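-- pv_equiv track=rewrite | github.com/mayrstefan/checkmk-extensions | pgbouncer/src/agent_based/pgbouncer_databases.py | parse_pgbouncer_databases
-- ===== SOURCE A (Python) =====
-- def parse_pgbouncer_databases(string_table):
--     databases = {}
--     instance_name = ""
--     instance_linecount = 0
--     instance_columns = []
--     for line in string_table:
--         if line[0].startswith("[[[") and line[0].endswith("]]]"):
--             instance_name = line[0][3:-3]
--             instance_linecount = 0
--             continue
--         instance_linecount += 1
--         # First line has column names
--         if instance_linecount == 1:
--             instance_columns = line
--             continue
--         # regular line represents a database
--         database = {}
--         for i in range(0, len(instance_columns)):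
--             database[instance_columns[i]] = line[i]
--         database_name = "%s/%s" % (instance_name, database["name"])
--         databases[database_name] = database
--     return databases
-- ===== SOURCE B (Python) =====
-- def parse_pgbouncer_databases(string_table):
--     # Phase 1: partition into (instance_name, rows) blocks; implicit first block named "".
--     blocks = []
--     name, rows = "", []
--     for line in string_table:
--         if line[0].startswith("[[[") and line[0].endswith("]]]"):
--             blocks.append((name, rows))
--             name, rows = line[0][3:-3], []
--         else:
--             rows.append(line)
--     blocks.append((name, rows))
--     # Phase 2: first row of each block is the column header, the rest are databases.
--     databases = {}
--     for name, rows in blocks: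
--         if not rows:
--             continue
--         instance_columns = rows[0]
--         for line in rows[1:]:
--             database = {}
--             for i in range(len(instance_columns)):
--                 database[instance_columns[i]] = line[i]
--             databases["%s/%s" % (name, database["name"])] = database
--     return databases
-- ===== Notes on version B (the rewrite author's own statement) =====
-- stated objective: alternative
-- what changed: B replaces A's single pass with running instance_name/linecount/columns state by a two-phase decomposition: first partition the table into (instance name, rows) blocks at [[[...]]] headers, then build the databases per block from the block's first row as columns.
import Mathlib
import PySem

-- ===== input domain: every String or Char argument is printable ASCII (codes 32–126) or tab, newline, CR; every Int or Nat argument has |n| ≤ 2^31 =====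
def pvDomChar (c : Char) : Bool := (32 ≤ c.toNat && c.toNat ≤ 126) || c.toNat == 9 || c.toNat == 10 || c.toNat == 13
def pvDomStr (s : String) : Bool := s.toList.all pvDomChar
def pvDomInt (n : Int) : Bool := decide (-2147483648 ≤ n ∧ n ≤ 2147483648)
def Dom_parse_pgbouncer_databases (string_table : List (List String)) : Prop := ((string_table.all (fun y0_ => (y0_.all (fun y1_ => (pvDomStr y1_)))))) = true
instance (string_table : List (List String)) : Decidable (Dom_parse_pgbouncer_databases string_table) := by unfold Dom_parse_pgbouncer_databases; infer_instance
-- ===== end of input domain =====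

-- B replaces A's single running-state pass by a two-phase decomposition (partition into header blocks, then process each block); alternative structure, same cost.


-- ===== PORT A =====
-- shared helper: the inner 'for i in range(0, len(instance_columns)): database[cols[i]] = line[i]' loop,
-- identical in both Python sources (pyGetD default "" is only reached where Python raises IndexError, outside Pre_)
def pvMkDb (cols line : List String) : PySem.Dict String String :=
  (PySem.List.pyRange 0 (cols.length : Int) 1).foldl
    (fun d i => d.insert (PySem.List.pyGetD cols i "") (PySem.List.pyGetD line i "")) PySem.Dict.empty

-- A's loop: running state (databases, instance_name, instance_linecount, instance_columns)
def pvA_loop : List (List String) → PySem.Dict String (PySem.Dict String String) → String → Int → List String → PySem.Dict String (PySem.Dict String String)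
  | [], db, _, _, _ => db
  | line :: rest, db, name, lc, cols =>
    let h := (PySem.List.pyGet? line 0).getD ""   -- line[0]; none (IndexError) only outside Pre_
    if PySem.Str.startswith h "[[[" && PySem.Str.endswith h "]]]" then
      pvA_loop rest db (PySem.Str.slice h (some 3) (some (-3))) 0 cols
    else
      let lc' := lc + 1
      if lc' == 1 then
        pvA_loop rest db name lc' line
      else
        let database := pvMkDb cols line
        let dbname := name ++ "/" ++ database.getD "name" ""   -- database["name"]; default "" only outside Pre_ (KeyError)
        pvA_loop rest (db.insert dbname database) name lc' cols

def parse_pgbouncer_databases (string_table : List (List String)) : List (String × List (String × String)) :=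
  (pvA_loop string_table PySem.Dict.empty "" 0 []).items.map (fun p => (p.1, p.2.items))

-- ===== PORT B =====
-- phase 1: partition into (instance name, rows) blocks
def pvSplitBlocks : String → List (List String) → List (List String) → List (String × List (List String))
  | name, rows, [] => [(name, rows)]
  | name, rows, line :: rest =>
    let h := (PySem.List.pyGet? line 0).getD ""
    if PySem.Str.startswith h "[[[" && PySem.Str.endswith h "]]]" then
      (name, rows) :: pvSplitBlocks (PySem.Str.slice h (some 3) (some (-3))) [] rest
    else
      pvSplitBlocks name (rows ++ [line]) rest

-- phase 2: first row of a block is its column header, the rest are databases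
def pvProcBlock (db : PySem.Dict String (PySem.Dict String String)) (blk : String × List (List String)) : PySem.Dict String (PySem.Dict String String) :=
  match blk.2 with
  | [] => db
  | cols :: data =>
    data.foldl (fun db line =>
      let database := pvMkDb cols line
      db.insert (blk.1 ++ "/" ++ database.getD "name" "") database) db

def parse_pgbouncer_databases_alt (string_table : List (List String)) : List (String × List (String × String)) :=
  (((pvSplitBlocks "" [] string_table).foldl pvProcBlock PySem.Dict.empty).items.map (fun p => (p.1, p.2.items)))

-- ===== PRECONDITION & SPEC =====
-- shape check for Pre_: every line nonempty (line[0] would raise IndexError), and every database row is at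
-- least as long as the current column header (IndexError) with "name" among the columns (KeyError).
def pvPreAux : Bool → List String → List (List String) → Bool
  | _, _, [] => true
  | first, cols, line :: rest =>
    match line with
    | [] => false
    | h :: _ =>
      if PySem.Str.startswith h "[[[" && PySem.Str.endswith h "]]]" then pvPreAux true cols rest
      else if first then pvPreAux false line rest
      else (decide (cols.length ≤ line.length) && cols.contains "name") && pvPreAux false cols rest

-- Pre_ excludes exactly the inputs on which Python A raises (IndexError on an empty line or a row shorter
-- than the column header, KeyError when "name" is not a column); A returns on every input admitted here.
def Pre_parse_pgbouncer_databases (string_table : List (List String)) : Prop :=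
  pvPreAux true [] string_table = true
instance (string_table : List (List String)) : Decidable (Pre_parse_pgbouncer_databases string_table) := by
  unfold Pre_parse_pgbouncer_databases; infer_instance

def pvWitness_parse_pgbouncer_databases : List (List String) :=
  [["[[[pg]]]"], ["name", "host"], ["db1", "h1"], ["db2", "h2"]]

def Spec_parse_pgbouncer_databases (string_table : List (List String)) (out : List (String × List (String × String))) : Prop := out = parse_pgbouncer_databases_alt string_table
instance (string_table : List (List String)) (out : List (String × List (String × String))) : Decidable (Spec_parse_pgbouncer_databases string_table out) := by unfold Spec_parse_pgbouncer_databases; infer_instance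

-- ===== CLAIM (what is proved, stated in full; the proofs are below) =====
def Claim_equal_parse_pgbouncer_databases : Prop := ∀ (string_table : List (List String)), Dom_parse_pgbouncer_databases string_table → Pre_parse_pgbouncer_databases string_table → Spec_parse_pgbouncer_databases string_table (parse_pgbouncer_databases string_table)

-- ===== LEMMAS AND PROOFS =====

-- common abstraction of both loops: current block's columns as an Option (none = header row not yet seen)
def pvG : List (List String) → PySem.Dict String (PySem.Dict String String) → String → Option (List String) → PySem.Dict String (PySem.Dict String String)
  | [], db, _, _ => db
  | line :: rest, db, name, copt =>
    let h := (PySem.List.pyGet? line 0).getD ""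
    if PySem.Str.startswith h "[[[" && PySem.Str.endswith h "]]]" then
      pvG rest db (PySem.Str.slice h (some 3) (some (-3))) none
    else
      match copt with
      | none => pvG rest db name (some line)
      | some cols =>
        pvG rest (db.insert (name ++ "/" ++ (pvMkDb cols line).getD "name" "") (pvMkDb cols line)) name (some cols)

lemma pvA_eq_pvG (lines : List (List String)) :
    ∀ (db : PySem.Dict String (PySem.Dict String String)) (name : String) (lc : Int) (cols : List String),
    0 ≤ lc →
    pvA_loop lines db name lc cols = pvG lines db name (if lc = 0 then none else some cols) := by
  induction lines with
  | nil => intro db name lc cols _; rfl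
  | cons line rest ih =>
    intro db name lc cols hlc
    simp only [pvA_loop, pvG]
    split
    · exact ih _ _ 0 cols le_rfl
    · by_cases h0 : lc = 0
      · subst h0
        rw [show (0:Int) + 1 = 1 from rfl]
        simp only [show ((1 : Int) == 1) = true from rfl, if_true]
        rw [ih _ _ 1 line (by omega)]
        norm_num
      · have h1 : (lc + 1 == 1) = false := by
          simpa using (by omega : lc + 1 ≠ 1)
        simp only [h1, if_neg h0]
        rw [ih _ _ (lc + 1) cols (by omega)]
        have : lc + 1 ≠ 0 := by omega
        simp [this]

lemma pvB_eq_pvG (lines : List (List String)) :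
    ∀ (name : String) (rows : List (List String)) (db : PySem.Dict String (PySem.Dict String String)),
    (pvSplitBlocks name rows lines).foldl pvProcBlock db =
      pvG lines (pvProcBlock db (name, rows)) name rows.head? := by
  induction lines with
  | nil =>
    intro name rows db
    simp [pvSplitBlocks, pvG]
  | cons line rest ih =>
    intro name rows db
    simp only [pvSplitBlocks, pvG]
    split
    · rw [List.foldl_cons, ih]
      simp [pvProcBlock]
    · cases rows with
      | nil =>
        rw [ih]
        simp [pvProcBlock]
      | cons cols data =>
        rw [ih]
        simp [pvProcBlock, List.foldl_append]

theorem parse_pgbouncer_databases_eq_alt (string_table : List (List String)) :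
    parse_pgbouncer_databases string_table = parse_pgbouncer_databases_alt string_table := by
  unfold parse_pgbouncer_databases parse_pgbouncer_databases_alt
  rw [pvA_eq_pvG string_table PySem.Dict.empty "" 0 [] le_rfl, pvB_eq_pvG]
  rfl

-- ===== VERDICT (by name: the statement is the Claim_ definition above) =====
theorem parse_pgbouncer_databases_spec : Claim_equal_parse_pgbouncer_databases := by
  intro string_table _ _
  unfold Spec_parse_pgbouncer_databases
  exact parse_pgbouncer_databases_eq_alt string_table
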